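-- pv_equiv track=rewrite | github.com/OpenAgentEval/SWE-ABS | sweabs_utils/parser_utils.py | split_diff_blocks
-- ===== SOURCE A (Python) =====
-- def split_diff_blocks(diff_text: str) -> list[str]:
--     """
--     Split diff into blocks by 'diff --git'.
--
--     Args:
--         diff_text: diff content
--     Returns:
--         diff blocks
--     """
--     blocks = []
--     current = []
--     for line in diff_text.splitlines(keepends=True):
--         if line.startswith("diff --git"):
--             if current:
--                 blocks.append("".join(current))
--                 current = []
--         current.append(line)
--     if current:
--         blocks.append("".join(current))
--     return blocks
-- ===== SOURCE B (Python) =====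
-- def split_diff_blocks(diff_text: str) -> list[str]:
--     """Split diff into blocks by 'diff --git': scan the raw text once for cut
--     positions (a header occurrence right after a line break), then slice the
--     text between consecutive cuts."""
--     n = len(diff_text)
--     if n == 0:
--         return []
--     cuts = [0]
--     for i in range(n):
--         if i > 0 and (diff_text[i - 1] == "\n" or (diff_text[i - 1] == "\r" and diff_text[i] != "\n")) \
--                 and diff_text.startswith("diff --git", i):
--             cuts.append(i)
--     cuts.append(n)
--     return [diff_text[a:b] for a, b in zip(cuts, cuts[1:])]
-- ===== Notes on version B (the rewrite author's own statement) =====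
-- stated objective: alternative
-- what changed: Replaced A's line-by-line accumulator-with-flush over splitlines by a character-level scan that never splits into lines: one pass over the raw string collects the cut positions where 'diff --git' starts a line (index 0 or right after a line break), and the blocks are produced by slicing the original text between consecutive cuts.
import Mathlib
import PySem

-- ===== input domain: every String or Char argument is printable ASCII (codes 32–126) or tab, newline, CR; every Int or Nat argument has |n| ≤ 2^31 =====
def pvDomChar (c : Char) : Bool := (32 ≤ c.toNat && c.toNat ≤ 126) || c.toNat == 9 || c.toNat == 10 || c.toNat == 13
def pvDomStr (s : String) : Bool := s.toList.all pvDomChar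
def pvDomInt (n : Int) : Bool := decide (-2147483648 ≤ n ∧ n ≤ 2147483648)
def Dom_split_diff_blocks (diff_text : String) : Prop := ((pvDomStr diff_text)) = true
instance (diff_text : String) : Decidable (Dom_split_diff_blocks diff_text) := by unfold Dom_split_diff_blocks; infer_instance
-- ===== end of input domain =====

-- B replaces A's accumulator-with-flush over splitlines by a character-level scan: one pass
-- collects the cut positions where "diff --git" starts a line, then blocks are slices between cuts.

-- ===== PORT A =====
-- A-side helper: Python's str.splitlines(keepends=True), exact on the ASCII domain (breaks '\n', '\r\n', '\r').
def pvLineSpan : List Char → List Char × List Char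
  | [] => ([], [])
  | c :: rest =>
    if c = '\n' then (['\n'], rest)
    else if c = '\r' then
      (if rest.head? = some '\n' then (['\r', '\n'], rest.tail) else (['\r'], rest))
    else (c :: (pvLineSpan rest).1, (pvLineSpan rest).2)

theorem pvLineSpan_snd_le : ∀ (cs : List Char),
    (pvLineSpan cs).2.length ≤ cs.length := by
  intro cs
  induction cs with
  | nil => simp [pvLineSpan]
  | cons c rest ih =>
    simp only [pvLineSpan]
    split_ifs <;> simp_all <;> omega

theorem pvLineSpan_snd_lt : ∀ (c : Char) (cs : List Char),
    (pvLineSpan (c :: cs)).2.length < (c :: cs).length := by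
  intro c cs
  have h := pvLineSpan_snd_le cs
  simp only [pvLineSpan]
  split_ifs <;> simp_all

def pvSplitKeep : List Char → List (List Char)
  | [] => []
  | c :: cs => (pvLineSpan (c :: cs)).1 :: pvSplitKeep (pvLineSpan (c :: cs)).2
  termination_by l => l.length
  decreasing_by exact pvLineSpan_snd_lt c cs

def pvIsStart (line : List Char) : Bool := PySem.Chars.startswith line ("diff --git".toList)

def pvStepA (st : List String × List (List Char)) (line : List Char) :
    List String × List (List Char) :=
  let st' := if pvIsStart line then
      (if st.2 = [] then st else (st.1 ++ [String.ofList st.2.flatten], ([] : List (List Char))))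
    else st
  (st'.1, st'.2 ++ [line])

def split_diff_blocks (diff_text : String) : List String :=
  let r := (pvSplitKeep diff_text.toList).foldl pvStepA ([], [])
  if r.2 = [] then r.1 else r.1 ++ [String.ofList r.2.flatten]

-- ===== PORT B =====
-- B-side helper: the loop-body test — cs[i-1] is a line break not swallowed by '\r\n',
-- and "diff --git" occurs at i (Python's diff_text.startswith("diff --git", i)).
def pvCutAt (cs : List Char) (i : Nat) : Bool :=
  decide (0 < i) &&
  (match cs[i-1]?, cs[i]? with
   | some p, c? => (p == '\n') || ((p == '\r') && !(c? == some '\n'))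
   | none, _ => false) &&
  PySem.Chars.startswith (cs.drop i) ("diff --git".toList)

def split_diff_blocks_alt (diff_text : String) : List String :=
  let cs := diff_text.toList
  let n := cs.length
  if n = 0 then []
  else
    let cuts := [0] ++ (List.range n).filter (fun i => pvCutAt cs i) ++ [n]
    (cuts.zip cuts.tail).map (fun p => String.ofList ((cs.drop p.1).take (p.2 - p.1)))

-- ===== PRECONDITION & SPEC =====
def Spec_split_diff_blocks (diff_text : String) (out : List String) : Prop := out = split_diff_blocks_alt diff_text
instance (diff_text : String) (out : List String) : Decidable (Spec_split_diff_blocks diff_text out) := by unfold Spec_split_diff_blocks; infer_instance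

-- ===== CLAIM (what is proved, stated in full; the proofs are below) =====
def Claim_equal_split_diff_blocks : Prop := ∀ (diff_text : String), Dom_split_diff_blocks diff_text → Spec_split_diff_blocks diff_text (split_diff_blocks diff_text)

-- ===== LEMMAS AND PROOFS =====

-- A-side characterization: the fold is the chunk decomposition of the line list.
def pvChunks : List (List Char) → List (List (List Char))
  | [] => []
  | l :: rest =>
      (l :: rest.takeWhile (fun x => !pvIsStart x)) ::
        pvChunks (rest.dropWhile (fun x => !pvIsStart x))
  termination_by ls => ls.length
  decreasing_by
    have := List.length_dropWhile_le (p := fun x => !pvIsStart x) (l := rest)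
    simp; omega

theorem pvChunks_cons (l : List Char) (rest : List (List Char)) :
    pvChunks (l :: rest) =
      (l :: rest.takeWhile (fun x => !pvIsStart x)) ::
        pvChunks (rest.dropWhile (fun x => !pvIsStart x)) := by
  rw [pvChunks]

theorem pv_main : ∀ (ls : List (List Char)) (blocks : List String) (cur : List (List Char)),
    cur ≠ [] →
    (let r := ls.foldl pvStepA (blocks, cur)
     if r.2 = [] then r.1 else r.1 ++ [String.ofList r.2.flatten])
    = blocks ++
        (((cur ++ ls.takeWhile (fun x => !pvIsStart x)) ::
            pvChunks (ls.dropWhile (fun x => !pvIsStart x))).map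
          (fun c => String.ofList c.flatten)) := by
  intro ls
  induction ls with
  | nil =>
    intro blocks cur h
    simp [pvChunks, h]
  | cons l ls ih =>
    intro blocks cur h
    by_cases hp : pvIsStart l
    · have hstep : pvStepA (blocks, cur) l = (blocks ++ [String.ofList cur.flatten], [l]) := by
        simp [pvStepA, hp, h]
      simp only [List.foldl_cons, hstep]
      have := ih (blocks ++ [String.ofList cur.flatten]) [l] (by simp)
      simp only [this, List.takeWhile_cons, List.dropWhile_cons, hp, Bool.not_true,
        if_neg Bool.false_ne_true, pvChunks_cons]
      simp
    · have hstep : pvStepA (blocks, cur) l = (blocks, cur ++ [l]) := by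
        simp [pvStepA, hp]
      simp only [List.foldl_cons, hstep]
      have := ih blocks (cur ++ [l]) (by simp)
      simp only [this, List.takeWhile_cons, List.dropWhile_cons]
      simp [hp]

theorem pvA_eq_chunks (s : String) :
    split_diff_blocks s =
      (pvChunks (pvSplitKeep s.toList)).map (fun c => String.ofList c.flatten) := by
  unfold split_diff_blocks
  cases hls : pvSplitKeep s.toList with
  | nil => simp [pvChunks]
  | cons l ls =>
    have hfirst : pvStepA ([], []) l = ([], [l]) := by
      simp [pvStepA]
    simp only [List.foldl_cons, hfirst]
    have := pv_main ls [] [l] (by simp)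
    simp only [this, pvChunks_cons]
    simp

-- Shared abbreviation for the header text (proof-side only).
def pvHdr : List Char := "diff --git".toList

-- B-side decomposition of the loop test: the line-break part.
def pvBreakAt (cs : List Char) (i : Nat) : Bool :=
  match cs[i-1]?, cs[i]? with
  | some p, c? => (p == '\n') || ((p == '\r') && !(c? == some '\n'))
  | none, _ => false

theorem pvCutAt_eq (cs : List Char) (i : Nat) :
    pvCutAt cs i = (decide (0 < i) && pvBreakAt cs i &&
      PySem.Chars.startswith (cs.drop i) pvHdr) := rfl

-- span rebuilds the input
theorem pvLineSpan_append : ∀ cs : List Char, (pvLineSpan cs).1 ++ (pvLineSpan cs).2 = cs := by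
  intro cs
  induction cs with
  | nil => simp [pvLineSpan]
  | cons c rest ih =>
    simp only [pvLineSpan]
    split_ifs with h1 h2 h3
    · simp [h1]
    · cases rest with
      | nil => simp at h3
      | cons d rest' => simp at h3; simp [h2, h3]
    · simp [h2]
    · simpa using ih

theorem pvLineSpan_fst_ne_nil : ∀ (c : Char) (rest : List Char),
    (pvLineSpan (c :: rest)).1 ≠ [] := by
  intro c rest
  simp only [pvLineSpan]
  split_ifs <;> simp

theorem pvSplitKeep_flatten : ∀ cs : List Char, (pvSplitKeep cs).flatten = cs := by
  intro cs
  induction cs using pvSplitKeep.induct with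
  | case1 => simp [pvSplitKeep]
  | case2 c cs ih =>
    rw [pvSplitKeep]
    simp only [List.flatten_cons, ih]
    exact pvLineSpan_append _

theorem pvBreak_shift : ∀ (a r : List Char) (j : Nat), 0 < j →
    pvBreakAt (a ++ r) (a.length + j) = pvBreakAt r j := by
  intro a r j hj
  unfold pvBreakAt
  rw [List.getElem?_append_right (by omega), List.getElem?_append_right (by omega)]
  have h1 : a.length + j - 1 - a.length = j - 1 := by omega
  have h2 : a.length + j - a.length = j := by omega
  rw [h1, h2]

theorem pvCut_shift : ∀ (a r : List Char) (j : Nat), 0 < j →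
    pvCutAt (a ++ r) (a.length + j) = pvCutAt r j := by
  intro a r j hj
  rw [pvCutAt_eq, pvCutAt_eq, pvBreak_shift a r j hj, List.drop_length_add_append]
  have : decide (0 < a.length + j) = decide (0 < j) := by simp; omega
  rw [this]

theorem pvBreak_inner : ∀ (cs : List Char) (i : Nat), 0 < i →
    i < (pvLineSpan cs).1.length → pvBreakAt cs i = false := by
  intro cs
  induction cs with
  | nil => intro i h1 h2; simp [pvLineSpan] at h2
  | cons c rest ih =>
    intro i h1 h2
    by_cases hn : c = '\n'
    · simp [pvLineSpan, hn] at h2; omega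
    · by_cases hr : c = '\r'
      · by_cases hh : rest.head? = some '\n'
        · simp only [pvLineSpan, if_neg hn, if_pos hr, if_pos hh] at h2
          have hi : i = 1 := by simp at h2; omega
          subst hi
          cases rest with
          | nil => simp at hh
          | cons d rest' =>
            simp at hh
            simp [pvBreakAt, hr, hh]
        · simp only [pvLineSpan, if_neg hn, if_pos hr, if_neg hh] at h2
          simp at h2; omega
      · simp only [pvLineSpan, if_neg hn, if_neg hr, List.length_cons] at h2
        rcases Nat.lt_or_ge i 2 with hi | hi
        · have : i = 1 := by omega
          subst this
          simp [pvBreakAt, hn, hr]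
        · have := pvBreak_shift [c] rest (i - 1) (by omega)
          simp only [List.length_cons, List.length_nil, List.singleton_append] at this
          have harith : 1 + (i - 1) = i := by omega
          rw [harith] at this
          rw [this]
          exact ih (i - 1) (by omega) (by omega)

theorem pvBreak_boundary : ∀ cs : List Char, (pvLineSpan cs).2 ≠ [] →
    pvBreakAt cs (pvLineSpan cs).1.length = true := by
  intro cs
  induction cs with
  | nil => intro h; simp [pvLineSpan] at h
  | cons c rest ih =>
    intro h
    by_cases hn : c = '\n'
    · simp [pvLineSpan, hn, pvBreakAt]
    · by_cases hr : c = '\r'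
      · by_cases hh : rest.head? = some '\n'
        · cases rest with
          | nil => simp at hh
          | cons d rest' =>
            simp at hh
            simp [pvLineSpan, hr, hh, pvBreakAt]
        · simp only [pvLineSpan, if_neg hn, if_pos hr, if_neg hh] at h ⊢
          cases rest with
          | nil => simp at h
          | cons d rest' =>
            simp only [List.head?_cons] at hh
            have hd : d ≠ '\n' := fun hc => hh (by rw [hc])
            simp [pvBreakAt, hr, hd]
      · simp only [pvLineSpan, if_neg hn, if_neg hr] at h ⊢
        cases rest with
        | nil => simp [pvLineSpan] at h
        | cons d rest' =>
          have hne := pvLineSpan_fst_ne_nil d rest'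
          have hlen : 0 < (pvLineSpan (d :: rest')).1.length := List.length_pos_iff.mpr hne
          have := pvBreak_shift [c] (d :: rest') (pvLineSpan (d :: rest')).1.length hlen
          simp only [List.length_cons, List.length_nil, List.singleton_append] at this
          rw [List.length_cons, Nat.add_comm, this]
          exact ih h

theorem pvSpan_last_term : ∀ cs : List Char, (pvLineSpan cs).2 ≠ [] →
    (pvLineSpan cs).1.getLast? = some '\n' ∨ (pvLineSpan cs).1.getLast? = some '\r' := by
  intro cs
  induction cs with
  | nil => intro h; simp [pvLineSpan] at h
  | cons c rest ih =>
    intro h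
    by_cases hn : c = '\n'
    · simp [pvLineSpan, hn]
    · by_cases hr : c = '\r'
      · by_cases hh : rest.head? = some '\n'
        · simp [pvLineSpan, hr, hh]
        · simp [pvLineSpan, hr, hh]
      · simp only [pvLineSpan, if_neg hn, if_neg hr] at h ⊢
        cases rest with
        | nil => simp [pvLineSpan] at h
        | cons d rest' =>
          have hne := pvLineSpan_fst_ne_nil d rest'
          cases hsp : (pvLineSpan (d :: rest')).1 with
          | nil => exact absurd hsp hne
          | cons e t =>
            rw [List.getLast?_cons_cons]
            have hih := ih h
            rw [hsp] at hih
            exact hih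

-- header comparison does not look past the end of a line that ends in a break
theorem pvHdr_append (a b : List Char)
    (ha : a.getLast? = some '\n' ∨ a.getLast? = some '\r') :
    PySem.Chars.startswith (a ++ b) pvHdr = PySem.Chars.startswith a pvHdr := by
  have hane : a ≠ [] := by
    rcases ha with h | h <;> exact fun hc => by simp [hc] at h
  rcases Nat.lt_or_ge a.length pvHdr.length with hlen | hlen
  · -- both false
    have h1 : PySem.Chars.startswith a pvHdr = false := by
      rw [Bool.eq_false_iff]
      intro hc
      have := List.IsPrefix.length_le ((PySem.Chars.startswith_iff _ _).mp hc)
      omega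
    have h2 : PySem.Chars.startswith (a ++ b) pvHdr = false := by
      rw [Bool.eq_false_iff]
      intro hc
      have hpre : pvHdr <+: a ++ b := (PySem.Chars.startswith_iff _ _).mp hc
      have hap : a <+: pvHdr :=
        List.prefix_of_prefix_length_le (List.prefix_append a b) hpre (by omega)
      have hlast : a.getLast? ≠ none := by
        rcases ha with h | h <;> simp [h]
      have hmem : ∀ c, a.getLast? = some c → c ∈ pvHdr := by
        intro c hcl
        exact hap.subset (List.mem_of_getLast? hcl)
      rcases ha with h | h
      · have := hmem _ h; revert this; decide
      · have := hmem _ h; revert this; decide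
    rw [h1, h2]
  · -- determined by the first pvHdr.length chars of a
    have hiff : (pvHdr <+: a ++ b) ↔ (pvHdr <+: a) := by
      rw [List.prefix_iff_eq_take, List.prefix_iff_eq_take, List.take_append]
      have : pvHdr.length - a.length = 0 := by omega
      rw [this, List.take_zero, List.append_nil]
    cases hc : PySem.Chars.startswith a pvHdr with
    | true =>
      rw [PySem.Chars.startswith_iff] at hc ⊢
      exact hiff.mpr hc
    | false =>
      rw [Bool.eq_false_iff] at hc ⊢
      intro hcc
      exact hc (by rw [PySem.Chars.startswith_iff] at hcc ⊢; exact hiff.mp hcc)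

-- the cut list, one line peeled
theorem pvF_peel (c : Char) (cs' : List Char) :
    (List.range (c :: cs').length).filter (fun i => pvCutAt (c :: cs') i)
    = (if (pvLineSpan (c :: cs')).2 ≠ [] ∧
          PySem.Chars.startswith (pvLineSpan (c :: cs')).2 pvHdr = true
       then [(pvLineSpan (c :: cs')).1.length] else [])
      ++ ((List.range (pvLineSpan (c :: cs')).2.length).filter
            (fun j => pvCutAt (pvLineSpan (c :: cs')).2 j)).map
          (· + (pvLineSpan (c :: cs')).1.length) := by
  set a := (pvLineSpan (c :: cs')).1 with ha
  set r := (pvLineSpan (c :: cs')).2 with hr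
  have happ : a ++ r = c :: cs' := pvLineSpan_append (c :: cs')
  have hane : a ≠ [] := pvLineSpan_fst_ne_nil c cs'
  have hm : 0 < a.length := List.length_pos_iff.mpr hane
  have hlen : (c :: cs').length = a.length + r.length := by
    rw [← happ, List.length_append]
  rw [hlen, List.range_add, List.filter_append, List.filter_map]
  have hfst : (List.range a.length).filter (fun i => pvCutAt (c :: cs') i) = [] := by
    rw [List.filter_eq_nil_iff]
    intro i hi
    rw [List.mem_range] at hi
    rcases Nat.eq_zero_or_pos i with h0 | h0
    · subst h0; rw [pvCutAt_eq]; simp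
    · rw [pvCutAt_eq, ← happ, pvBreak_inner (a ++ r) i h0 (by rw [ha, happ]; omega)]
      simp
  rw [hfst, List.nil_append]
  cases hre : r with
  | nil => simp
  | cons d r' =>
    have hrne : r ≠ [] := by rw [hre]; exact List.cons_ne_nil d r'
    have hrl : 0 < r.length := List.length_pos_iff.mpr hrne
    rw [← hre]
    have hrange : List.range r.length = 0 :: (List.range (r.length - 1)).map Nat.succ := by
      conv_lhs => rw [show r.length = (r.length - 1) + 1 by omega]
      rw [List.range_succ_eq_map]
    have hb : pvBreakAt (c :: cs') a.length = true := by
      have hb' := pvBreak_boundary (c :: cs') (by rw [← hr]; exact hrne)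
      rw [← ha] at hb'
      exact hb'
    have hdrop : (c :: cs').drop a.length = r := by
      rw [← happ]; exact List.drop_left
    have h0 : pvCutAt (c :: cs') a.length = PySem.Chars.startswith r pvHdr := by
      rw [pvCutAt_eq, hb, hdrop]
      simp [hm]
    have hfilt :
        (List.range (r.length - 1)).filter
            (((fun i => pvCutAt (c :: cs') i) ∘ fun x => a.length + x) ∘ Nat.succ)
          = (List.range (r.length - 1)).filter ((fun j => pvCutAt r j) ∘ Nat.succ) := by
      apply List.filter_congr
      intro j _
      simp only [Function.comp_apply]
      rw [← happ]
      exact pvCut_shift a r (Nat.succ j) (Nat.succ_pos j)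
    have hcutr0 : pvCutAt r 0 = false := by rw [pvCutAt_eq]; simp
    have hmm : ∀ (F : List Nat),
        List.map (fun x => a.length + x) (List.map Nat.succ F)
          = List.map ((fun x => x + a.length) ∘ Nat.succ) F := by
      intro F
      rw [List.map_map]
      apply List.map_congr_left
      intro y _
      simp [Function.comp]
      omega
    rw [hrange, List.filter_cons, List.filter_cons]
    simp only [Function.comp_apply, Nat.add_zero, h0, hcutr0, List.filter_map, hfilt]
    cases hsw : PySem.Chars.startswith r pvHdr with
    | true => simp [hrne, hmm]
    | false => simp [hmm]

-- the cut list computed from the line table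
def pvHdrAux : List (List Char) → List Nat
  | [] => []
  | l :: ls =>
      (match ls.head? with
       | some l₂ => if pvIsStart l₂ then [l.length] else []
       | none => []) ++ (pvHdrAux ls).map (· + l.length)

theorem pvF_lines : ∀ cs : List Char,
    (List.range cs.length).filter (fun i => pvCutAt cs i) = pvHdrAux (pvSplitKeep cs) := by
  intro cs
  induction cs using pvSplitKeep.induct with
  | case1 => simp [pvSplitKeep, pvHdrAux]
  | case2 c cs' ih =>
    rw [pvSplitKeep, pvF_peel c cs']
    set a := (pvLineSpan (c :: cs')).1 with ha
    set r := (pvLineSpan (c :: cs')).2 with hr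
    rw [ih]
    unfold pvHdrAux
    cases hre : r with
    | nil => simp [pvSplitKeep, pvHdrAux]
    | cons d r' =>
      rw [← hre]
      have hrne : r ≠ [] := by rw [hre]; exact List.cons_ne_nil d r'
      have hsk : pvSplitKeep r = (pvLineSpan r).1 :: pvSplitKeep (pvLineSpan r).2 := by
        rw [hre]; rw [pvSplitKeep]
      rw [hsk]
      simp only [List.head?_cons]
      congr 1
      -- first components agree: startswith on r relates to pvIsStart on r's first line
      have hr2 : r = (pvLineSpan r).1 ++ (pvLineSpan r).2 := (pvLineSpan_append r).symm
      have hsw : PySem.Chars.startswith r pvHdr = pvIsStart (pvLineSpan r).1 := by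
        cases hr3 : (pvLineSpan r).2 with
        | nil =>
          conv_lhs => rw [hr2, hr3, List.append_nil]
          rfl
        | cons e e' =>
          conv_lhs => rw [hr2]
          rw [pvHdr_append _ _ (pvSpan_last_term r (by rw [hr3]; exact List.cons_ne_nil e e'))]
          rfl
      rw [hsw]
      by_cases hst : pvIsStart (pvLineSpan r).1 = true
      · rw [if_pos (And.intro hrne hst), if_pos hst]
      · rw [if_neg (fun hc => hst hc.2), if_neg hst]

-- the cut list of a line table, one chunk peeled
theorem pvHdrAux_chunk : ∀ (rest : List (List Char)) (l : List Char),
    pvHdrAux (l :: rest) =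
      (if rest.dropWhile (fun x => !pvIsStart x) = [] then []
       else [(l :: rest.takeWhile (fun x => !pvIsStart x)).flatten.length])
      ++ (pvHdrAux (rest.dropWhile (fun x => !pvIsStart x))).map
          (· + (l :: rest.takeWhile (fun x => !pvIsStart x)).flatten.length) := by
  intro rest
  induction rest with
  | nil => intro l; simp [pvHdrAux]
  | cons l₂ rest' ih =>
    intro l
    by_cases hp : pvIsStart l₂ = true
    · have htw : (l₂ :: rest').takeWhile (fun x => !pvIsStart x) = [] := by
        simp [hp]
      have hdw : (l₂ :: rest').dropWhile (fun x => !pvIsStart x) = l₂ :: rest' := by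
        simp [hp]
      rw [htw, hdw, if_neg (List.cons_ne_nil _ _)]
      have hK : (l :: ([] : List (List Char))).flatten.length = l.length := by simp
      rw [hK]
      conv_lhs => rw [pvHdrAux]
      simp [hp]
    · have hpf : pvIsStart l₂ = false := by
        cases hb : pvIsStart l₂
        · rfl
        · exact absurd hb hp
      have htw : (l₂ :: rest').takeWhile (fun x => !pvIsStart x)
          = l₂ :: rest'.takeWhile (fun x => !pvIsStart x) := by
        simp [hpf]
      have hdw : (l₂ :: rest').dropWhile (fun x => !pvIsStart x)
          = rest'.dropWhile (fun x => !pvIsStart x) := by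
        simp [hpf]
      rw [htw, hdw]
      have hlhs : pvHdrAux (l :: l₂ :: rest') = (pvHdrAux (l₂ :: rest')).map (· + l.length) := by
        conv_lhs => rw [pvHdrAux]
        simp [hpf]
      rw [hlhs, ih l₂, List.map_append, List.map_map]
      have hKK : (l :: l₂ :: rest'.takeWhile (fun x => !pvIsStart x)).flatten.length
          = (l₂ :: rest'.takeWhile (fun x => !pvIsStart x)).flatten.length + l.length := by
        simp only [List.flatten_cons, List.length_append]
        omega
      congr 1
      · by_cases hd : rest'.dropWhile (fun x => !pvIsStart x) = []
        · simp [hd]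
        · rw [if_neg hd, if_neg hd, List.map_cons, List.map_nil, hKK]
      · apply List.map_congr_left
        intro y _
        simp only [Function.comp_apply]
        rw [hKK]
        omega

-- shifting a slice table by a common offset
theorem pvSlices_shift : ∀ (L : List Nat) (x K : Nat) (cs : List Char), K ≤ x →
    (∀ y ∈ L, K ≤ y) →
    ((x :: L).zip L).map (fun p => String.ofList ((cs.drop p.1).take (p.2 - p.1)))
    = (((x - K) :: L.map (· - K)).zip (L.map (· - K))).map
        (fun p => String.ofList (((cs.drop K).drop p.1).take (p.2 - p.1))) := by
  intro L
  induction L with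
  | nil => intro x K cs _ _; simp
  | cons y L' ih =>
    intro x K cs hx hall
    have hy : K ≤ y := hall y List.mem_cons_self
    simp only [List.map_cons, List.zip_cons_cons, List.map_cons]
    have hdd : (cs.drop K).drop (x - K) = cs.drop x := by
      rw [List.drop_drop]
      congr 1
      omega
    have har : y - K - (x - K) = y - x := by omega
    rw [hdd, har]
    congr 1
    exact ih y K cs hy (fun z hz => hall z (List.mem_cons_of_mem _ hz))

-- slicing at the line-table cuts is exactly the chunk decomposition
theorem pvSL : ∀ ls : List (List Char), ls ≠ [] →
    ((([0] ++ pvHdrAux ls ++ [ls.flatten.length]).zip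
        (([0] ++ pvHdrAux ls ++ [ls.flatten.length]).tail)).map
      (fun p : Nat × Nat => String.ofList ((ls.flatten.drop p.1).take (p.2 - p.1))))
    = (pvChunks ls).map (fun c => String.ofList c.flatten) := by
  intro ls
  induction ls using pvChunks.induct with
  | case1 => intro h; exact absurd rfl h
  | case2 l rest ih =>
    intro _
    have hrest : rest.takeWhile (fun x => !pvIsStart x) ++ rest.dropWhile (fun x => !pvIsStart x)
        = rest := List.takeWhile_append_dropWhile
    have hflat : (l :: rest).flatten
        = (l :: rest.takeWhile (fun x => !pvIsStart x)).flatten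
          ++ (rest.dropWhile (fun x => !pvIsStart x)).flatten := by
      conv_lhs => rw [← hrest]
      simp only [List.flatten_cons, List.flatten_append, List.append_assoc]
    rw [pvChunks_cons, pvHdrAux_chunk rest l]
    by_cases hdnil : rest.dropWhile (fun x => !pvIsStart x) = []
    · have htw : rest.takeWhile (fun x => !pvIsStart x) = rest := by
        conv_rhs => rw [← hrest]
        rw [hdnil, List.append_nil]
      have hchn : pvChunks ([] : List (List Char)) = [] := by rw [pvChunks]
      have haux : pvHdrAux ([] : List (List Char)) = [] := rfl
      rw [if_pos hdnil, hdnil, haux, htw, hchn]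
      simp only [List.map_nil, List.append_nil, List.nil_append, List.cons_append,
        List.tail_cons, List.zip_cons_cons, List.zip_nil_right, List.map_cons]
      rw [List.drop_zero, Nat.sub_zero, List.take_length]
    · rw [if_neg hdnil]
      -- abbreviations
      generalize hK : (l :: rest.takeWhile (fun x => !pvIsStart x)).flatten.length = K at *
      have hN : (l :: rest).flatten.length
          = K + (rest.dropWhile (fun x => !pvIsStart x)).flatten.length := by
        rw [hflat, List.length_append, hK]
      simp only [List.cons_append, List.nil_append]
      rw [List.tail_cons, List.zip_cons_cons, List.map_cons]
      congr 1
      · -- first slice is the first chunk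
        rw [List.drop_zero, Nat.sub_zero, hflat]
        have : ((l :: rest.takeWhile (fun x => !pvIsStart x)).flatten
            ++ (rest.dropWhile (fun x => !pvIsStart x)).flatten).take K
            = (l :: rest.takeWhile (fun x => !pvIsStart x)).flatten := by
          rw [← hK]
          exact List.take_left
        rw [this]
      · -- remaining slices are the remaining chunks
        have hall : ∀ y ∈ (pvHdrAux (rest.dropWhile (fun x => !pvIsStart x))).map (· + K)
            ++ [(l :: rest).flatten.length], K ≤ y := by
          intro y hy
          rcases List.mem_append.mp hy with hy | hy
          · rcases List.mem_map.mp hy with ⟨z, _, hz⟩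
            rw [← hz]
            exact Nat.le_add_left K z
          · simp only [List.mem_singleton] at hy
            rw [hy, hN]
            exact Nat.le_add_right _ _
        have hshift := pvSlices_shift
          ((pvHdrAux (rest.dropWhile (fun x => !pvIsStart x))).map (· + K)
            ++ [(l :: rest).flatten.length]) K K ((l :: rest).flatten) (Nat.le_refl K) hall
        rw [hshift]
        have hdropK : ((l :: rest).flatten).drop K
            = (rest.dropWhile (fun x => !pvIsStart x)).flatten := by
          rw [hflat, ← hK]
          exact List.drop_left
        have hmapsub : ((pvHdrAux (rest.dropWhile (fun x => !pvIsStart x))).map (· + K)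
            ++ [(l :: rest).flatten.length]).map (· - K)
            = pvHdrAux (rest.dropWhile (fun x => !pvIsStart x))
              ++ [(rest.dropWhile (fun x => !pvIsStart x)).flatten.length] := by
          rw [List.map_append, List.map_map]
          congr 1
          · apply (List.map_congr_left _).trans (List.map_id _)
            intro z _
            simp only [Function.comp_apply, id_eq]
            omega
          · simp only [List.map_cons, List.map_nil, List.cons.injEq, and_true]
            rw [hN]
            omega
        rw [hmapsub, hdropK, Nat.sub_self]
        exact ih hdnil

theorem pvAll (s : String) : split_diff_blocks s = split_diff_blocks_alt s := by
  rw [pvA_eq_chunks]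
  simp only [split_diff_blocks_alt]
  cases hcs : s.toList with
  | nil => simp [pvSplitKeep, pvChunks]
  | cons c cs' =>
    have hn : ¬ (c :: cs').length = 0 := by simp
    rw [if_neg hn, pvF_lines (c :: cs')]
    have hsk : pvSplitKeep (c :: cs') ≠ [] := by
      rw [pvSplitKeep]; exact List.cons_ne_nil _ _
    have hfl : (pvSplitKeep (c :: cs')).flatten = c :: cs' := pvSplitKeep_flatten _
    have hres := (pvSL (pvSplitKeep (c :: cs')) hsk).symm
    rw [hfl] at hres
    exact hres

-- ===== VERDICT (by name: the statement is the Claim_ definition above) =====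
theorem split_diff_blocks_spec : Claim_equal_split_diff_blocks := by
  intro s _
  unfold Spec_split_diff_blocks
  exact pvAll s
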